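-- pv_equiv track=rewrite | github.com/timfduffy/emotion-vectors | generate_stories.py | parse_stories
-- ===== SOURCE A (Python) =====
-- def parse_stories(raw_text: str) -> list[str]:
--     """Parse the generated text into individual stories."""
--     stories = []
--     current_story = []
--
--     for line in raw_text.split('\n'):
--         stripped = line.strip().lower()
--         if stripped.startswith('[story') and stripped.endswith(']'):
--             if current_story:
--                 story_text = '\n'.join(current_story).strip()
--                 if story_text:
--                     stories.append(story_text)
--                 current_story = []
--         else:
--             current_story.append(line)
--
--     if current_story:
--         story_text = '\n'.join(current_story).strip()
--         if story_text:
--             stories.append(story_text)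
--
--     return stories
-- ===== SOURCE B (Python) =====
-- def parse_stories(raw_text: str) -> list[str]:
--     """Parse the generated text into individual stories."""
--     lines = raw_text.split('\n')
--     marks = [i for i, l in enumerate(lines)
--              if l.strip().lower().startswith('[story') and l.strip().lower().endswith(']')]
--     starts = [0] + [i + 1 for i in marks]
--     ends = marks + [len(lines)]
--     stories = []
--     for a, b in zip(starts, ends):
--         t = '\n'.join(lines[a:b]).strip()
--         if t:
--             stories.append(t)
--     return stories
-- ===== Notes on version B (the rewrite author's own statement) =====
-- stated objective: alternative
-- what changed: B replaces A's streaming accumulator (flush current chunk at each marker, plus duplicated end-of-loop flush) with an index-based two-stage algorithm: first collect the positions of all marker lines, then cut the line list by slicing between consecutive marker positions (zip of start/end indices) and join/strip/filter each slice.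
import Mathlib
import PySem

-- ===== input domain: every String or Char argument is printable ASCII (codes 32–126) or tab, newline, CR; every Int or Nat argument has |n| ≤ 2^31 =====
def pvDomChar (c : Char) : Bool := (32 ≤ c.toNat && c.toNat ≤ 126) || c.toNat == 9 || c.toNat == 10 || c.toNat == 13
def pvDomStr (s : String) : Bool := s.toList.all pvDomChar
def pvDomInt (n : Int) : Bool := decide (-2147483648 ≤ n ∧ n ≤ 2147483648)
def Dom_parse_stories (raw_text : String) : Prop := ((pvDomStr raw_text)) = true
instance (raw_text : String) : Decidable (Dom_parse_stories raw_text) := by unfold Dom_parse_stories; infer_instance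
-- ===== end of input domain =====

-- B replaces A's streaming accumulator with an index-based two-stage algorithm:
-- collect the marker-line positions first, then cut the line list by slice pairs (alternative; same cost).

-- ===== PORT A =====
-- the loop body of A: state = (stories, current_story)
def pvStepA (st : List String × List String) (line : String) : List String × List String :=
  let stripped := PySem.Str.lower (PySem.Str.strip line)
  if PySem.Str.startswith stripped "[story" && PySem.Str.endswith stripped "]" then
    if st.2 ≠ [] then
      let story_text := PySem.Str.strip (PySem.Str.join "\n" st.2)
      (if story_text ≠ "" then st.1 ++ [story_text] else st.1, [])
    else st
  else (st.1, st.2 ++ [line])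

def parse_stories (raw_text : String) : List String :=
  let st : List String × List String := ((PySem.Str.split? raw_text "\n").getD []).foldl pvStepA ([], [])
  if st.2 ≠ [] then
    let story_text := PySem.Str.strip (PySem.Str.join "\n" st.2)
    if story_text ≠ "" then st.1 ++ [story_text] else st.1
  else st.1

-- ===== PORT B =====
-- `l.strip().lower().startswith('[story') and l.strip().lower().endswith(']')`
def pvIsMarker (l : String) : Bool :=
  PySem.Str.startswith (PySem.Str.lower (PySem.Str.strip l)) "[story"
    && PySem.Str.endswith (PySem.Str.lower (PySem.Str.strip l)) "]"

def parse_stories_alt (raw_text : String) : List String :=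
  let lines := (PySem.Str.split? raw_text "\n").getD []
  -- marks = [i for i, l in enumerate(lines) if …]
  let marks := ((PySem.List.enumerate lines 0).filter (fun p => pvIsMarker p.2)).map (·.1)
  -- starts = [0] + [i + 1 for i in marks];  ends = marks + [len(lines)]
  let starts := (0 : Int) :: marks.map (· + 1)
  let ends := marks ++ [(lines.length : Int)]
  (starts.zip ends).foldl (fun stories p =>
    let t := PySem.Str.strip (PySem.Str.join "\n" (PySem.List.slice lines (some p.1) (some p.2)))
    if t ≠ "" then stories ++ [t] else stories) []

-- ===== PRECONDITION & SPEC =====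
def Spec_parse_stories (raw_text : String) (out : List String) : Prop := out = parse_stories_alt raw_text
instance (raw_text : String) (out : List String) : Decidable (Spec_parse_stories raw_text out) := by unfold Spec_parse_stories; infer_instance

-- ===== CLAIM (what is proved, stated in full; the proofs are below) =====
def Claim_equal_parse_stories : Prop := ∀ (raw_text : String), Dom_parse_stories raw_text → Spec_parse_stories raw_text (parse_stories raw_text)

-- ===== LEMMAS AND PROOFS =====

-- story emitted from one chunk of lines: join, strip, drop if empty
def pvEmit (c : List String) : List String :=
  let t := PySem.Str.strip (PySem.Str.join "\n" c)
  if t ≠ "" then [t] else []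

-- the chunks of a line list, split at marker lines (proof-side characterisation)
def pvC : List String → List (List String)
  | [] => [[]]
  | l :: ls =>
    if pvIsMarker l then [] :: pvC ls
    else
      match pvC ls with
      | c :: cs => (l :: c) :: cs
      | [] => [[l]]

-- nat-valued marker positions
def pvMarks : List String → List Nat
  | [] => []
  | l :: ls => if pvIsMarker l then 0 :: (pvMarks ls).map (· + 1) else (pvMarks ls).map (· + 1)

def pvSl (lines : List String) (p : Nat × Nat) : List String :=
  (lines.drop p.1).take (p.2 - p.1)

-- A's final flush, as a function
def pvFin (st : List String × List String) : List String :=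
  if st.2 ≠ [] then
    let story_text := PySem.Str.strip (PySem.Str.join "\n" st.2)
    if story_text ≠ "" then st.1 ++ [story_text] else st.1
  else st.1

-- prepend `cur` onto the first chunk
def pvPre (cur : List String) : List (List String) → List (List String)
  | c :: cs => (cur ++ c) :: cs
  | [] => [cur]

lemma pvEmit_nil : pvEmit [] = [] := by decide

lemma pvC_ne_nil (ls : List String) : pvC ls ≠ [] := by
  cases ls with
  | nil => simp [pvC]
  | cons l ls =>
    simp only [pvC]
    split_ifs
    · simp
    · cases h : pvC ls <;> simp

lemma pvFin_eq (acc cur : List String) : pvFin (acc, cur) = acc ++ pvEmit cur := by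
  rcases cur with _ | ⟨c, cs⟩
  · simp [pvFin, pvEmit_nil]
  · simp only [pvFin, pvEmit]
    split_ifs with h h' <;> simp_all

-- A's loop invariant
lemma pvLoopA (ls : List String) : ∀ (acc cur : List String),
    pvFin (List.foldl pvStepA (acc, cur) ls) = acc ++ (pvPre cur (pvC ls)).flatMap pvEmit := by
  induction ls with
  | nil =>
    intro acc cur
    simp [pvC, pvPre, pvFin_eq]
  | cons l ls ih =>
    intro acc cur
    obtain ⟨c, cs, hc⟩ : ∃ c cs, pvC ls = c :: cs := by
      cases hc : pvC ls with
      | nil => exact absurd hc (pvC_ne_nil ls)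
      | cons c cs => exact ⟨c, cs, rfl⟩
    by_cases h : pvIsMarker l = true
    · have hstep : pvStepA (acc, cur) l = (acc ++ pvEmit cur, []) := by
        simp only [pvStepA, pvIsMarker] at h ⊢
        rw [if_pos h]
        rcases cur with _ | ⟨c, cs⟩
        · simp [pvEmit_nil]
        · simp only [pvEmit]
          split_ifs with h1 h2 <;> simp_all
      rw [List.foldl_cons, hstep, ih]
      simp only [pvC, if_pos h, hc]
      simp [pvPre]
    · have hstep : pvStepA (acc, cur) l = (acc, cur ++ [l]) := by
        simp only [pvStepA, pvIsMarker] at h ⊢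
        rw [if_neg h]
      rw [List.foldl_cons, hstep, ih]
      simp only [pvC, if_neg h, hc]
      simp [pvPre]

-- marker positions via enumerate, shifted by the start index
lemma pvMarksEnum (ls : List String) : ∀ (s : Int),
    ((PySem.List.enumerate ls s).filter (fun p => pvIsMarker p.2)).map (·.1)
      = (pvMarks ls).map (fun (k : Nat) => s + (k : Int)) := by
  induction ls with
  | nil => intro s; simp [PySem.List.enumerate_nil, pvMarks]
  | cons l ls ih =>
    intro s
    rw [PySem.List.enumerate_cons]
    by_cases h : pvIsMarker l = true
    · rw [List.filter_cons_of_pos (by simpa using h)]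
      simp only [pvMarks, if_pos h, List.map_cons, List.map_map]
      rw [ih]
      refine congrArg₂ List.cons (by push_cast; ring) ?_
      apply List.map_congr_left; intro k _
      simp only [Function.comp_apply]; push_cast; ring
    · rw [List.filter_cons_of_neg (by simpa using h)]
      simp only [pvMarks, if_neg h, List.map_map]
      rw [ih]
      apply List.map_congr_left; intro k _
      simp only [Function.comp_apply]; push_cast; ring

lemma pvZipShift (A B : List Nat) :
    (A.map (· + 1)).zip (B.map (· + 1)) = (A.zip B).map (fun p => (p.1 + 1, p.2 + 1)) := by
  rw [List.zip_map]
  apply List.map_congr_left; intro p _; cases p; rfl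

lemma pvMapShift (l : String) (ls : List String) (A B : List Nat) :
    ((A.map (· + 1)).zip (B.map (· + 1))).map (pvSl (l :: ls)) = (A.zip B).map (pvSl ls) := by
  rw [pvZipShift, List.map_map]
  apply List.map_congr_left; intro p _
  cases p with | mk a b => simp [pvSl, Nat.succ_sub_succ]

-- B's slices are exactly the chunks
lemma pvSlicesC (ls : List String) :
    (((0 : Nat) :: (pvMarks ls).map (· + 1)).zip (pvMarks ls ++ [ls.length])).map (pvSl ls)
      = pvC ls := by
  induction ls with
  | nil => simp [pvMarks, pvC, pvSl]
  | cons l ls ih =>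
    obtain ⟨e0, E', hE⟩ : ∃ e0 E', pvMarks ls ++ [ls.length] = e0 :: E' :=
      List.exists_cons_of_ne_nil (by simp)
    by_cases h : pvIsMarker l = true
    · simp only [pvC, if_pos h, pvMarks, List.length_cons]
      have hE2 : (pvMarks ls).map (· + 1) ++ [ls.length + 1]
          = (pvMarks ls ++ [ls.length]).map (· + 1) := by simp
      calc ((0 :: ((0 :: (pvMarks ls).map (· + 1)).map (· + 1))).zip
              ((0 :: (pvMarks ls).map (· + 1)) ++ [ls.length + 1])).map (pvSl (l :: ls))
          = pvSl (l :: ls) (0, 0) ::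
              (((0 :: (pvMarks ls).map (· + 1)).map (· + 1)).zip
                ((pvMarks ls ++ [ls.length]).map (· + 1))).map (pvSl (l :: ls)) := by
            rw [← hE2]; rfl
        _ = [] :: ((((0 :: (pvMarks ls).map (· + 1)).zip (pvMarks ls ++ [ls.length])).map
              (fun p => (p.1 + 1, p.2 + 1))).map (pvSl (l :: ls))) := by
            rw [pvZipShift]; rfl
        _ = [] :: (((0 :: (pvMarks ls).map (· + 1)).zip
              (pvMarks ls ++ [ls.length])).map (pvSl ls)) := by
            rw [List.map_map]
            refine congrArg _ (List.map_congr_left fun p _ => ?_)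
            cases p with | mk a b => simp [pvSl, Nat.succ_sub_succ]
        _ = [] :: pvC ls := by rw [ih]
    · rw [hE] at ih
      simp only [List.zip_cons_cons, List.map_cons] at ih
      have hm : pvMarks (l :: ls) = (pvMarks ls).map (· + 1) := by
        simp [pvMarks, h]
      have hpc : pvC (l :: ls) = (l :: pvSl ls (0, e0)) ::
          (((pvMarks ls).map (· + 1)).zip E').map (pvSl ls) := by
        simp only [pvC, if_neg h, ← ih]
      rw [hm, hpc, List.length_cons]
      have h2 : (pvMarks ls).map (· + 1) ++ [ls.length + 1] = (e0 + 1) :: E'.map (· + 1) := by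
        have h3 : (pvMarks ls).map (· + 1) ++ [ls.length + 1]
            = (pvMarks ls ++ [ls.length]).map (· + 1) := by simp
        rw [h3, hE]; rfl
      rw [h2, List.zip_cons_cons, List.map_cons]
      refine congrArg₂ List.cons ?_ (pvMapShift l ls _ E')
      simp [pvSl]

-- B's fold step appends pvEmit of the slice
lemma pvAltFlat (lines : List String) (ps : List (Int × Int)) (acc : List String) :
    ps.foldl (fun stories p =>
      let t := PySem.Str.strip (PySem.Str.join "\n" (PySem.List.slice lines (some p.1) (some p.2)))
      if t ≠ "" then stories ++ [t] else stories) acc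
    = acc ++ ps.flatMap (fun p => pvEmit (PySem.List.slice lines (some p.1) (some p.2))) := by
  have hstep : (fun (stories : List String) (p : Int × Int) =>
      let t := PySem.Str.strip (PySem.Str.join "\n" (PySem.List.slice lines (some p.1) (some p.2)))
      if t ≠ "" then stories ++ [t] else stories)
      = fun stories p => stories ++ pvEmit (PySem.List.slice lines (some p.1) (some p.2)) := by
    funext st p
    simp only [pvEmit]
    split_ifs <;> simp
  rw [hstep]
  exact PySem.List.foldl_append_eq_flatMap _ ps acc

-- ===== VERDICT (by name: the statement is the Claim_ definition above) =====
theorem parse_stories_spec : Claim_equal_parse_stories := by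
  intro raw_text _
  unfold Spec_parse_stories parse_stories parse_stories_alt
  set lines := (PySem.Str.split? raw_text "\n").getD [] with hlines
  have hA : pvFin (lines.foldl pvStepA ([], [])) = (pvC lines).flatMap pvEmit := by
    rw [pvLoopA lines [] []]
    obtain ⟨c, cs, hc⟩ : ∃ c cs, pvC lines = c :: cs := by
      cases hc : pvC lines with
      | nil => exact absurd hc (pvC_ne_nil lines)
      | cons c cs => exact ⟨c, cs, rfl⟩
    rw [hc]; simp [pvPre]
  have hB : ((((0 : Int) :: (((PySem.List.enumerate lines 0).filter
          (fun p => pvIsMarker p.2)).map (·.1)).map (· + 1)).zip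
        ((((PySem.List.enumerate lines 0).filter (fun p => pvIsMarker p.2)).map (·.1))
          ++ [(lines.length : Int)])).foldl
        (fun stories p =>
          let t := PySem.Str.strip (PySem.Str.join "\n"
            (PySem.List.slice lines (some p.1) (some p.2)))
          if t ≠ "" then stories ++ [t] else stories) [])
      = (pvC lines).flatMap pvEmit := by
    rw [pvAltFlat, pvMarksEnum lines 0, List.nil_append]
    have hf : (pvMarks lines).map (fun (k : Nat) => (0 : Int) + (k : Int))
        = (pvMarks lines).map (fun (k : Nat) => (k : Int)) := by
      apply List.map_congr_left; intro k _; ring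
    rw [hf]
    have hS : ((0 : Int) :: ((pvMarks lines).map (fun (k : Nat) => (k : Int))).map (· + 1))
        = (((0 : Nat) :: (pvMarks lines).map (· + 1)).map (fun (k : Nat) => (k : Int))) := by
      simp only [List.map_cons, List.map_map, Nat.cast_zero]
      refine congrArg₂ List.cons rfl ?_
      apply List.map_congr_left; intro k _
      simp only [Function.comp_apply]; push_cast; ring
    have hEn : (((pvMarks lines).map (fun (k : Nat) => (k : Int))) ++ [(lines.length : Int)])
        = ((pvMarks lines ++ [lines.length]).map (fun (k : Nat) => (k : Int))) := by simp
    rw [hS, hEn, List.zip_map, List.flatMap_map]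
    have hfun : (fun a : Nat × Nat =>
        pvEmit (PySem.List.slice lines
          (some (Prod.map (fun (k : Nat) => (k : Int)) (fun (k : Nat) => (k : Int)) a).1)
          (some (Prod.map (fun (k : Nat) => (k : Int)) (fun (k : Nat) => (k : Int)) a).2)))
        = fun p : Nat × Nat => pvEmit (pvSl lines p) := by
      funext p
      cases p with
      | mk a b =>
        show pvEmit (PySem.List.slice lines (some ((a : Int))) (some ((b : Int))))
            = pvEmit (pvSl lines (a, b))
        rw [PySem.List.slice_natCast]
        rfl
    rw [hfun, ← pvSlicesC lines, List.flatMap_map]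
  exact hA.trans hB.symm
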